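-- pv_equiv track=rewrite | github.com/liliyequantum/nonergodicityRL | RL_obser_F_full/basisAndHamiltonian.py | count_bits_on_even_positions
-- ===== SOURCE A (Python) =====
-- def count_bits_on_even_positions(number):
--     count = 0
--     position = 1
--
--     while number > 0:
--         if position % 2 == 1 and number & 1 ==1:
--             count += 1
--         number >>=1
--         position += 1
--     return count
-- ===== SOURCE B (Python) =====
-- def count_bits_on_even_positions(number):
--     if number <= 0:
--         return 0
--     s = bin(number)[2:][::-1]
--     return sum(1 for i in range(0, len(s), 2) if s[i] == '1')
-- ===== Notes on version B (the rewrite author's own statement) =====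
-- stated objective: idiomatic
-- what changed: Replaces the integer bit-walk with parity state (position counter + right shift) by building the LSB-first binary string once and counting '1' characters at stride-2 indices.
import Mathlib
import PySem

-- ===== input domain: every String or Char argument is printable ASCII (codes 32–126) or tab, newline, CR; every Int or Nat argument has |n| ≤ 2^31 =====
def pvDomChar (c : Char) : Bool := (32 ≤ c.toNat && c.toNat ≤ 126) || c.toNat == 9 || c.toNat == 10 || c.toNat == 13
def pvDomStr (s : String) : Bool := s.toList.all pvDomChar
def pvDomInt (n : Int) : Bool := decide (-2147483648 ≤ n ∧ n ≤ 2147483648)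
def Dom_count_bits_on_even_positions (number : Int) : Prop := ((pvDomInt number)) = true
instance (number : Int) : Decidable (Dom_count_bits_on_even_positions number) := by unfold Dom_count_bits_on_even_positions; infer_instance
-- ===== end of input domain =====

-- B replaces A's integer bit-walk (position counter + right shift) by building the
-- LSB-first binary string once and counting '1' characters at stride-2 indices (idiomatic).

-- ===== PORT A =====
-- the while loop: state (number, count, position); 'number >>= 1' is floor division by 2
-- (exact: Python's arithmetic right shift by 1), 'number & 1' is 'number mod 2' (exact for all ints).
def pvLoopA (number count position : Int) : Int :=
  if _h : number > 0 then
    pvLoopA (PySem.Int.floordiv number 2)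
      (if PySem.Int.mod position 2 = 1 ∧ PySem.Int.mod number 2 = 1 then count + 1 else count)
      (position + 1)
  else count
termination_by number.toNat
decreasing_by
  have : PySem.Int.floordiv number 2 = number / 2 := by
    simp [PySem.Int.floordiv, Int.fdiv_eq_ediv]
  rw [this]; omega

def count_bits_on_even_positions (number : Int) : Int := pvLoopA number 0 1

-- ===== PORT B =====
-- bin(n)[2:] for n > 0: the binary digits MSB-first (hand port of bin; exact for n > 0)
def pvBinChars (n : Nat) : List Char :=
  if n = 0 then [] else pvBinChars (n / 2) ++ [if n % 2 = 1 then '1' else '0']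

def count_bits_on_even_positions_alt (number : Int) : Int :=
  if number ≤ 0 then 0
  else
    -- s = bin(number)[2:][::-1]  (reverse = [::-1], PySem.List.slice?_none_none_neg_one)
    let s := (pvBinChars number.toNat).reverse
    -- sum(1 for i in range(0, len(s), 2) if s[i] == '1'); s[i] is in range, so getD is exact
    (PySem.List.pyRange 0 (s.length : Int) 2).foldl
      (fun acc i => acc + if PySem.List.pyGetD s i ' ' = '1' then 1 else 0) 0

-- ===== PRECONDITION & SPEC =====
def Spec_count_bits_on_even_positions (number : Int) (out : Int) : Prop := out = count_bits_on_even_positions_alt number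
instance (number : Int) (out : Int) : Decidable (Spec_count_bits_on_even_positions number out) := by unfold Spec_count_bits_on_even_positions; infer_instance

-- ===== CLAIM (what is proved, stated in full; the proofs are below) =====
def Claim_equal_count_bits_on_even_positions : Prop := ∀ (number : Int), Dom_count_bits_on_even_positions number → Spec_count_bits_on_even_positions number (count_bits_on_even_positions number)

-- ===== LEMMAS AND PROOFS =====

-- reference count: bits of n at positions where the alternating flag b is true (b flips per bit)
def pvCnt (n : Nat) (b : Bool) : Int :=
  if n = 0 then 0 else (if b && decide (n % 2 = 1) then 1 else 0) + pvCnt (n / 2) (!b)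
decreasing_by exact Nat.div_lt_self (by omega) (by omega)

-- the same count read off a LSB-first digit list
def pvCntList (l : List Char) (b : Bool) : Int :=
  match l with
  | [] => 0
  | c :: r => (if b && decide (c = '1') then 1 else 0) + pvCntList r (!b)

def pvLsb (n : Nat) : List Char :=
  if n = 0 then [] else (if n % 2 = 1 then '1' else '0') :: pvLsb (n / 2)
decreasing_by exact Nat.div_lt_self (by omega) (by omega)

lemma pvFloordiv_nat (n : Nat) : PySem.Int.floordiv (n : Int) 2 = ((n / 2 : Nat) : Int) := by
  simp [PySem.Int.floordiv, Int.fdiv_eq_ediv]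

lemma pvMod_nat (n : Nat) : PySem.Int.mod (n : Int) 2 = ((n % 2 : Nat) : Int) := by
  simp [PySem.Int.mod, Int.fmod_eq_emod]

lemma pvLoopA_eq (n : Nat) : ∀ c p : Int,
    pvLoopA (n : Int) c p = c + pvCnt n (decide (PySem.Int.mod p 2 = 1)) := by
  induction n using Nat.strong_induction_on with
  | _ n ih =>
    intro c p
    by_cases h : n = 0
    · subst h
      rw [pvLoopA, pvCnt]
      simp
    · rw [pvLoopA, pvCnt]
      have hpos : (0:Int) < (n:Int) := by exact_mod_cast Nat.pos_of_ne_zero h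
      rw [dif_pos hpos, if_neg h, pvFloordiv_nat, pvMod_nat,
        ih (n / 2) (Nat.div_lt_self (Nat.pos_of_ne_zero h) (by omega))]
      have hp : PySem.Int.mod p 2 = p % 2 := by
        simp [PySem.Int.mod, Int.fmod_eq_emod]
      have hp1 : PySem.Int.mod (p+1) 2 = (p+1) % 2 := by
        simp [PySem.Int.mod, Int.fmod_eq_emod]
      rw [hp, hp1]
      have h2 : p % 2 = 0 ∨ p % 2 = 1 := Int.emod_two_eq_zero_or_one p
      rcases h2 with h2 | h2
      · have h3 : (p+1) % 2 = 1 := by omega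
        rcases Nat.mod_two_eq_zero_or_one n with hn | hn <;>
          simp [h2, h3, hn]
      · have h3 : (p+1) % 2 = 0 := by omega
        rcases Nat.mod_two_eq_zero_or_one n with hn | hn <;>
          simp [h2, h3, hn, add_assoc]

lemma pvReverse_binChars (n : Nat) : (pvBinChars n).reverse = pvLsb n := by
  induction n using Nat.strong_induction_on with
  | _ n ih =>
    by_cases h : n = 0
    · subst h; rw [pvBinChars, pvLsb]; simp
    · rw [pvBinChars, pvLsb, if_neg h, if_neg h]
      simp [ih (n / 2) (Nat.div_lt_self (Nat.pos_of_ne_zero h) (by omega))]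

lemma pvCntList_lsb (n : Nat) : ∀ b, pvCntList (pvLsb n) b = pvCnt n b := by
  induction n using Nat.strong_induction_on with
  | _ n ih =>
    intro b
    by_cases h : n = 0
    · subst h; rw [pvLsb, pvCnt]; simp [pvCntList]
    · rw [pvLsb, pvCnt, if_neg h, if_neg h, pvCntList,
        ih (n / 2) (Nat.div_lt_self (Nat.pos_of_ne_zero h) (by omega))]
      rcases Nat.mod_two_eq_zero_or_one n with hn | hn <;> simp [hn]

-- the stride-2 indexed fold over a list equals the alternating count starting at true
lemma pvFold_stride2 (l : List Char) :
    (PySem.List.pyRange 0 (l.length : Int) 2).foldl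
      (fun acc i => acc + if PySem.List.pyGetD l i ' ' = '1' then 1 else 0) 0
    = pvCntList l true := by
  rw [PySem.List.foldl_add]
  suffices h : ∀ (m : Nat) (l : List Char), l.length = m →
      ((PySem.List.pyRange 0 (l.length : Int) 2).map
        (fun i => if PySem.List.pyGetD l i ' ' = '1' then (1:Int) else 0)).sum
      = pvCntList l true by
    have := h l.length l rfl; omega
  intro m
  induction m using Nat.strong_induction_on with
  | _ m ih =>
    intro l hl
    match l, m, hl with
    | [], _, rfl =>
      rw [show ((List.length ([]:List Char) : Nat):Int) = 0 by simp,
        PySem.List.pyRange_of_pos 0 0 (by omega)]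
      simp [pvCntList]
    | [a], _, rfl =>
      rw [show ((List.length [a] : Nat):Int) = 1 by simp,
        PySem.List.pyRange_of_pos 0 1 (by omega)]
      have hga : PySem.List.pyGetD [a] 0 ' ' = a := by
        rw [show (0:Int) = ((0:Nat):Int) from rfl, PySem.List.pyGetD_natCast]; rfl
      norm_num [pvCntList, hga]
    | a :: b :: r, _, rfl =>
      have hlen : (((a :: b :: r).length : Nat) : Int) = (r.length : Int) + 2 := by
        simp; omega
      rw [hlen]
      have hsplit : PySem.List.pyRange 0 ((r.length : Int) + 2) 2
          = 0 :: (PySem.List.pyRange 0 (r.length : Int) 2).map (· + 2) := by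
        rw [PySem.List.pyRange_of_pos 0 ((r.length : Int) + 2) (by omega),
            PySem.List.pyRange_of_pos 0 (r.length : Int) (by omega)]
        have h2 : (if (0:Int) < (r.length : Int) + 2 then (((r.length:Int) + 2 - 0 + 2 - 1) / 2).toNat else 0)
            = (if (0:Int) < (r.length:Int) then (((r.length:Int) - 0 + 2 - 1) / 2).toNat else 0) + 1 := by
          split_ifs <;> omega
        rw [h2, List.range_succ_eq_map, List.map_cons, List.map_map, List.map_map]
        refine List.cons_eq_cons.mpr ⟨by norm_num, List.map_congr_left ?_⟩
        intro k _
        simp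
        ring
      rw [hsplit, List.map_cons, List.map_map]
      have hga : PySem.List.pyGetD (a :: b :: r) 0 ' ' = a := by
        rw [show (0:Int) = ((0:Nat):Int) from rfl, PySem.List.pyGetD_natCast]; rfl
      have hmap : ((PySem.List.pyRange 0 (r.length:Int) 2).map
            ((fun i => if PySem.List.pyGetD (a :: b :: r) i ' ' = '1' then (1:Int) else 0) ∘ (· + 2)))
          = (PySem.List.pyRange 0 (r.length:Int) 2).map
            (fun i => if PySem.List.pyGetD r i ' ' = '1' then (1:Int) else 0) := by
        refine List.map_congr_left ?_
        intro i hi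
        rw [PySem.List.mem_pyRange_iff_of_pos (by omega)] at hi
        obtain ⟨hi0, _, _⟩ := hi
        obtain ⟨k, rfl⟩ : ∃ k : Nat, i = (k : Int) := ⟨i.toNat, by omega⟩
        have hcast : (k : Int) + 2 = ((k + 2 : Nat) : Int) := by push_cast; ring
        simp only [Function.comp_apply, hcast, PySem.List.pyGetD_natCast]
        rfl
      rw [hmap, List.sum_cons, hga, ih r.length (by simp) r rfl]
      show _ = pvCntList (a :: b :: r) true
      rcases eq_or_ne a '1' with h1 | h1 <;> simp [pvCntList, h1]

-- ===== VERDICT (by name: the statement is the Claim_ definition above) =====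
theorem count_bits_on_even_positions_spec : Claim_equal_count_bits_on_even_positions := by
  intro number _
  unfold Spec_count_bits_on_even_positions count_bits_on_even_positions count_bits_on_even_positions_alt
  by_cases h : number ≤ 0
  · rw [if_pos h, pvLoopA]
    rw [dif_neg (by omega)]
  · rw [if_neg h]
    obtain ⟨n, rfl⟩ : ∃ n : Nat, number = (n : Int) := ⟨number.toNat, by omega⟩
    rw [pvLoopA_eq n 0 1]
    have : PySem.Int.mod 1 2 = 1 := by decide
    rw [this]
    simp only [Int.toNat_natCast, decide_true, zero_add]
    have h1 : pvCntList ((pvBinChars n).reverse) true = pvCnt n true := by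
      rw [pvReverse_binChars, pvCntList_lsb]
    exact h1.symm.trans (pvFold_stride2 ((pvBinChars n).reverse)).symm
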